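-- pv_equiv track=rewrite | github.com/Jurij15/SchoolPython | 2L/Testi/2/7.py | OdmotajPrepleteneCrke
-- ===== SOURCE A (Python) =====
-- def OdmotajPrepleteneCrke(niz):
--     velikeCrke = ""
--     maleCrke = ""
--
--     for c in niz:
--         if c.isupper():
--             velikeCrke = velikeCrke + c
--         else:
--             maleCrke = maleCrke + c
--
--     return  velikeCrke+maleCrke
-- ===== SOURCE B (Python) =====
-- def OdmotajPrepleteneCrke(niz):
--     # One stable sort keyed on "not uppercase": uppercase chars (key False) keep
--     # their relative order and come before all others (key True).
--     return ''.join(sorted(niz, key=lambda c: not c.isupper()))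
-- ===== Notes on version B (the rewrite author's own statement) =====
-- stated objective: idiomatic
-- what changed: Replaces the manual two-accumulator partition loop with a single stable sort keyed on the predicate (not c.isupper()), joined once.
import Mathlib
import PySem

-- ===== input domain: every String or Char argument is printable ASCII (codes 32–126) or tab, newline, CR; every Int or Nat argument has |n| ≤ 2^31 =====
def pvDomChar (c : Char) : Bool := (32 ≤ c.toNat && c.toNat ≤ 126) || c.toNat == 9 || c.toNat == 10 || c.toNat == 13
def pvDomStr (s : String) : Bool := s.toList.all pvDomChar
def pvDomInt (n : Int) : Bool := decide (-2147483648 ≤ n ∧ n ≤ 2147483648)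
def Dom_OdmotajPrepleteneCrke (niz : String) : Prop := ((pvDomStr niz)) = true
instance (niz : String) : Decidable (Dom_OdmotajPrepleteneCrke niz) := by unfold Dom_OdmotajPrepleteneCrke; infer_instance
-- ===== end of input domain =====

-- B replaces A's two-accumulator partition loop by one stable sort keyed on "not isupper"; equal return values, no mutation involved.

-- ===== PORT A =====
-- A's loop over the string with the two growing accumulators (strings as lists of chars).
def goA_OdmotajPrepleteneCrke : List Char → List Char → List Char → List Char
  | [], velike, male => velike ++ male
  | c :: rest, velike, male =>
      if PySem.Chars.isupper c then goA_OdmotajPrepleteneCrke rest (velike ++ [c]) male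
      else goA_OdmotajPrepleteneCrke rest velike (male ++ [c])

def OdmotajPrepleteneCrke (niz : String) : String :=
  String.mk (goA_OdmotajPrepleteneCrke niz.toList [] [])

-- ===== PORT B =====
-- ''.join(sorted(niz, key=lambda c: not c.isupper())); the Bool key False/True is ported as the Int key 0/1.
def OdmotajPrepleteneCrke_alt (niz : String) : String :=
  String.mk (PySem.List.sorted niz.toList (fun c => if PySem.Chars.isupper c then (0 : Int) else 1) false)

-- ===== PRECONDITION & SPEC =====
def Spec_OdmotajPrepleteneCrke (niz : String) (out : String) : Prop := out = OdmotajPrepleteneCrke_alt niz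
instance (niz : String) (out : String) : Decidable (Spec_OdmotajPrepleteneCrke niz out) := by unfold Spec_OdmotajPrepleteneCrke; infer_instance

-- ===== CLAIM (what is proved, stated in full; the proofs are below) =====
def Claim_equal_OdmotajPrepleteneCrke : Prop := ∀ (niz : String), Dom_OdmotajPrepleteneCrke niz → Spec_OdmotajPrepleteneCrke niz (OdmotajPrepleteneCrke niz)

-- ===== LEMMAS AND PROOFS =====

-- A's loop computes the upper-filter followed by the rest-filter.
theorem goA_eq_filter (cs velike male : List Char) :
    goA_OdmotajPrepleteneCrke cs velike male =
      (velike ++ cs.filter (fun c => PySem.Chars.isupper c)) ++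
      (male ++ cs.filter (fun c => !PySem.Chars.isupper c)) := by
  induction cs generalizing velike male with
  | nil => simp [goA_OdmotajPrepleteneCrke]
  | cons c rest ih =>
      by_cases h : PySem.Chars.isupper c = true <;>
        simp [goA_OdmotajPrepleteneCrke, h, ih]

-- Inserting an uppercase char into (uppers ++ lowers) puts it right after the uppers.
theorem insertBy_upper (x : Char) (hx : PySem.Chars.isupper x = true)
    (U L : List Char) (hU : ∀ y ∈ U, PySem.Chars.isupper y = true)
    (hL : ∀ y ∈ L, PySem.Chars.isupper y = false) :
    PySem.List.insertBy
      (fun a b => decide ((if PySem.Chars.isupper a then (0 : Int) else 1) <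
                          (if PySem.Chars.isupper b then (0 : Int) else 1))) x (U ++ L)
      = U ++ x :: L := by
  induction U with
  | nil =>
      cases L with
      | nil => simp [PySem.List.insertBy]
      | cons y ys =>
          have hy := hL y (by simp)
          simp [PySem.List.insertBy, hx, hy]
  | cons u us ih =>
      have hu := hU u (by simp)
      simp only [List.cons_append, PySem.List.insertBy, hx, hu]
      simp only [decide_eq_true_eq]
      rw [if_neg (by norm_num)]
      rw [ih (fun y hy => hU y (by simp [hy]))]

-- Inserting a non-uppercase char appends it at the end.
theorem insertBy_lower (x : Char) (hx : PySem.Chars.isupper x = false) (zs : List Char) :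
    PySem.List.insertBy
      (fun a b => decide ((if PySem.Chars.isupper a then (0 : Int) else 1) <
                          (if PySem.Chars.isupper b then (0 : Int) else 1))) x zs
      = zs ++ [x] := by
  induction zs with
  | nil => simp [PySem.List.insertBy]
  | cons z t ih =>
      by_cases hz : PySem.Chars.isupper z = true <;>
        simp [PySem.List.insertBy, hx, hz, ih]

-- The stable insertion-sort fold keeps the invariant "uppers so far ++ lowers so far".
theorem sorted_fold_partition (cs : List Char) (U L : List Char)
    (hU : ∀ y ∈ U, PySem.Chars.isupper y = true)
    (hL : ∀ y ∈ L, PySem.Chars.isupper y = false) :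
    cs.foldl (fun acc x => PySem.List.insertBy
      (fun a b => decide ((if PySem.Chars.isupper a then (0 : Int) else 1) <
                          (if PySem.Chars.isupper b then (0 : Int) else 1))) x acc) (U ++ L)
      = (U ++ cs.filter (fun c => PySem.Chars.isupper c)) ++
        (L ++ cs.filter (fun c => !PySem.Chars.isupper c)) := by
  induction cs generalizing U L with
  | nil => simp
  | cons c rest ih =>
      by_cases h : PySem.Chars.isupper c = true
      · simp only [List.foldl_cons, insertBy_upper c h U L hU hL]
        have := ih (U ++ [c]) L
          (by intro y hy; rcases List.mem_append.1 hy with hy | hy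
              · exact hU y hy
              · simp at hy; simpa [hy] using h)
          hL
        simpa [List.filter_cons, h] using this
      · have h' : PySem.Chars.isupper c = false := by simpa using h
        simp only [List.foldl_cons]
        rw [show U ++ L = (U ++ L : List Char) from rfl, insertBy_lower c h' (U ++ L)]
        have := ih U (L ++ [c]) hU
          (by intro y hy; rcases List.mem_append.1 hy with hy | hy
              · exact hL y hy
              · simp at hy; simpa [hy] using h')
        simpa [List.filter_cons, h'] using this

theorem sorted_eq_partition (cs : List Char) :
    PySem.List.sorted cs (fun c => if PySem.Chars.isupper c then (0 : Int) else 1) false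
      = cs.filter (fun c => PySem.Chars.isupper c) ++ cs.filter (fun c => !PySem.Chars.isupper c) := by
  have := sorted_fold_partition cs [] [] (by simp) (by simp)
  simpa [PySem.List.sorted] using this

-- ===== VERDICT (by name: the statement is the Claim_ definition above) =====
theorem OdmotajPrepleteneCrke_spec : Claim_equal_OdmotajPrepleteneCrke := by
  intro niz _
  unfold Spec_OdmotajPrepleteneCrke OdmotajPrepleteneCrke OdmotajPrepleteneCrke_alt
  rw [sorted_eq_partition, goA_eq_filter]
  simp
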